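-- pv_equiv track=rewrite | github.com/lakshyaboony-dot/boonyweb | core/question_generator.py | parse_output_to_questions
-- ===== SOURCE A (Python) =====
-- def parse_output_to_questions(raw_output, category):
--     """
--     Parses OpenAI output into a list of {question, ideal_answer, category}
--     """
--     questions = []
--     lines = raw_output.strip().split("\n")
--     current_q = {}
--     for line in lines:
--         if line.strip().startswith("Q:"):
--             if current_q:
--                 questions.append(current_q)
--                 current_q = {}
--             current_q["question"] = line.strip()[2:].strip()
--         elif line.strip().startswith("A:"):
--             current_q["ideal_answer"] = line.strip()[2:].strip()
--             current_q["category"] = category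
--     if current_q:
--         questions.append(current_q)
--     return questions
-- ===== SOURCE B (Python) =====
-- def parse_output_to_questions(raw_output, category):
--     def is_q(line):
--         return line.strip().startswith("Q:")
--
--     def payload(line):
--         return line.strip()[2:].strip()
--
--     def to_dict(group):
--         d = {"question": payload(group[0])} if group and is_q(group[0]) else {}
--         answers = [payload(l) for l in group if l.strip().startswith("A:")]
--         if answers:
--             d["ideal_answer"] = answers[-1]
--             d["category"] = category
--         return d
--
--     lines = raw_output.strip().split("\n")
--     groups = []
--     current = []
--     for line in lines:
--         if is_q(line):
--             groups.append(current)
--             current = [line]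
--         else:
--             current.append(line)
--     groups.append(current)
--     return [d for d in map(to_dict, groups) if d]
-- ===== Notes on version B (the rewrite author's own statement) =====
-- stated objective: alternative
-- what changed: A's single stateful pass that mutates a current dict and flushes it on each 'Q:' line is replaced by a two-phase decomposition: first split the lines into groups at 'Q:' boundaries, then map each group independently to a dict (question from the group's first line, ideal_answer from its last 'A:' line), dropping empty dicts.
import Mathlib
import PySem

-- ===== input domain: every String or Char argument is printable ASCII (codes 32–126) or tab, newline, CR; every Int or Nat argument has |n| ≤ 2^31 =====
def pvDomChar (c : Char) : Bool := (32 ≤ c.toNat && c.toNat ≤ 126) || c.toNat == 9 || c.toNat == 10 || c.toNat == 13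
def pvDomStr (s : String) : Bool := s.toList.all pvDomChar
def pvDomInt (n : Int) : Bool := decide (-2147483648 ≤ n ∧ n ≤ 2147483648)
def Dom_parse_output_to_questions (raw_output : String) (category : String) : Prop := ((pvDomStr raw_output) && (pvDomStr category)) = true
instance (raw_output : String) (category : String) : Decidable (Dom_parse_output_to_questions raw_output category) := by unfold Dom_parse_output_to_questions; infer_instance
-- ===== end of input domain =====

-- B re-decomposes A's single stateful pass into split-into-groups + map-each-group-to-a-dict
-- (objective: alternative decomposition, same cost); equivalence of the return values is proved below.

-- ===== PORT A =====
-- dicts are PySem.Dict (Python insertion-order semantics); the result list carries their .items.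
-- loop body of A's `for line in lines`, state = (questions, current_q)
def pvAStep (category : String)
    (st : List (PySem.Dict String String) × PySem.Dict String String) (line : String) :
    List (PySem.Dict String String) × PySem.Dict String String :=
  if PySem.Str.startswith (PySem.Str.strip line) "Q:" then
    let st := if st.2.items.isEmpty then st else (st.1 ++ [st.2], PySem.Dict.empty)
    (st.1, st.2.insert "question" (PySem.Str.strip (PySem.Str.slice (PySem.Str.strip line) (some 2) none)))
  else if PySem.Str.startswith (PySem.Str.strip line) "A:" then
    (st.1, (st.2.insert "ideal_answer" (PySem.Str.strip (PySem.Str.slice (PySem.Str.strip line) (some 2) none))).insert "category" category)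
  else st

def parse_output_to_questions (raw_output : String) (category : String) : List (List (String × String)) :=
  -- raw_output.strip().split("\n"): the separator "\n" is a non-empty literal, so split? is `some`
  let lines := (PySem.Str.split? (PySem.Str.strip raw_output) "\n").getD []
  let st := lines.foldl (pvAStep category) ([], PySem.Dict.empty)
  let questions := if st.2.items.isEmpty then st.1 else st.1 ++ [st.2]
  questions.map (fun d => d.items)

-- ===== PORT B =====
def pvIsQ (line : String) : Bool := PySem.Str.startswith (PySem.Str.strip line) "Q:"

def pvPayload (line : String) : String :=
  PySem.Str.strip (PySem.Str.slice (PySem.Str.strip line) (some 2) none)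

-- B's to_dict: the three keys are distinct and each assigned once, so the dict IS this literal list
def pvToDict (category : String) (group : List String) : List (String × String) :=
  let d : List (String × String) :=
    match group with
    | g0 :: _ => if pvIsQ g0 then [("question", pvPayload g0)] else []
    | [] => []
  let answers := (group.filter (fun l => PySem.Str.startswith (PySem.Str.strip l) "A:")).map pvPayload
  match answers.getLast? with
  | some a => d ++ [("ideal_answer", a), ("category", category)]
  | none => d

def parse_output_to_questions_alt (raw_output : String) (category : String) : List (List (String × String)) :=
  let lines := (PySem.Str.split? (PySem.Str.strip raw_output) "\n").getD []
  let st := lines.foldl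
    (fun (st : List (List String) × List String) line =>
      if pvIsQ line then (st.1 ++ [st.2], [line]) else (st.1, st.2 ++ [line]))
    ([], [])
  let groups := st.1 ++ [st.2]
  (groups.map (pvToDict category)).filter (fun d => !d.isEmpty)

-- ===== PRECONDITION & SPEC =====
def Spec_parse_output_to_questions (raw_output : String) (category : String) (out : List (List (String × String))) : Prop := out = parse_output_to_questions_alt raw_output category
instance (raw_output : String) (category : String) (out : List (List (String × String))) : Decidable (Spec_parse_output_to_questions raw_output category out) := by unfold Spec_parse_output_to_questions; infer_instance

-- ===== CLAIM (what is proved, stated in full; the proofs are below) =====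
def Claim_equal_parse_output_to_questions : Prop := ∀ (raw_output : String) (category : String), Dom_parse_output_to_questions raw_output category → Spec_parse_output_to_questions raw_output category (parse_output_to_questions raw_output category)

-- ===== LEMMAS AND PROOFS =====

def pvIsA (line : String) : Bool := PySem.Str.startswith (PySem.Str.strip line) "A:"

-- the dict-update a single line performs in A (off the append/reset bookkeeping)
def pvStepD (category : String) (d : PySem.Dict String String) (line : String) : PySem.Dict String String :=
  if pvIsQ line then d.insert "question" (pvPayload line)
  else if pvIsA line then (d.insert "ideal_answer" (pvPayload line)).insert "category" category
  else d

def pvDictOf (category : String) (g : List String) : PySem.Dict String String :=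
  g.foldl (pvStepD category) PySem.Dict.empty

def pvTail (category : String) (g : List String) : List (String × String) :=
  match ((g.filter pvIsA).map pvPayload).getLast? with
  | some a => [("ideal_answer", a), ("category", category)]
  | none => []

def pvEmit (d : List (String × String)) : List (List (String × String)) :=
  if d.isEmpty then [] else [d]

-- output contributed by the open group g followed by the remaining lines l, A-side / B-side
def pvOutA (category : String) (g : List String) : List String → List (List (String × String))
  | [] => pvEmit (pvDictOf category g).items
  | x :: l => if pvIsQ x then pvEmit (pvDictOf category g).items ++ pvOutA category [x] l
              else pvOutA category (g ++ [x]) l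

def pvOutB (category : String) (g : List String) : List String → List (List (String × String))
  | [] => pvEmit (pvToDict category g)
  | x :: l => if pvIsQ x then pvEmit (pvToDict category g) ++ pvOutB category [x] l
              else pvOutB category (g ++ [x]) l

lemma pvQ_not_A (x : String) (h : pvIsQ x = true) : pvIsA x = false := by
  unfold pvIsQ at h
  unfold pvIsA
  rw [PySem.Str.startswith_eq] at *
  rw [PySem.Chars.startswith_iff] at h
  by_contra hc
  rw [Bool.not_eq_false, PySem.Chars.startswith_iff] at hc
  obtain ⟨t, ht⟩ := h
  obtain ⟨u, hu⟩ := hc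
  rw [← ht] at hu
  simp at hu

lemma pvMapId (pre : List (String × String)) (k v : String)
    (h : ∀ p ∈ pre, p.1 ≠ k) : pre.map (fun p => if p.1 == k then (k, v) else p) = pre := by
  induction pre with
  | nil => rfl
  | cons p pre ih =>
    have hp := h p (by simp)
    simp only [List.map_cons, ih (fun q hq => h q (List.mem_cons_of_mem _ hq))]
    simp [hp]

lemma pvNotKey (d : PySem.Dict String String) (k : String) (h : d.contains k = false) :
    ∀ p ∈ d.items, p.1 ≠ k := by
  intro p hp he
  have hc : d.contains k = true := (PySem.Dict.contains_iff_mem_keys d k).mpr (by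
    simp only [PySem.Dict.keys]
    exact List.mem_map.mpr ⟨p, hp, he⟩)
  rw [h] at hc
  exact Bool.false_ne_true hc

lemma pvTail_cons_of_A (category x : String) (rest : List String) (h : pvIsA x = true) :
    pvTail category (x :: rest)
      = [("ideal_answer", (((rest.filter pvIsA).map pvPayload).getLast?).getD (pvPayload x)),
         ("category", category)] := by
  simp only [pvTail, List.filter_cons_of_pos h, List.map_cons, List.getLast?_cons]

lemma pvTail_cons_of_not_A (category x : String) (rest : List String) (h : pvIsA x = false) :
    pvTail category (x :: rest) = pvTail category rest := by
  have hf : (x :: rest).filter pvIsA = rest.filter pvIsA := by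
    simp [h]
  simp only [pvTail, hf]

lemma pvToDict_eq_tail (category : String) (g : List String) :
    pvToDict category g
      = (match g with
         | g0 :: _ => if pvIsQ g0 then [("question", pvPayload g0)] else []
         | [] => []) ++ pvTail category g := by
  unfold pvToDict pvTail pvIsA
  cases hl : ((g.filter fun l => PySem.Str.startswith (PySem.Str.strip l) "A:").map pvPayload).getLast? with
  | none => simp only [hl]; simp
  | some a => simp only [hl]

-- overwrite phase: the dict already ends with ("ideal_answer", a0), ("category", category)
lemma pvL5 (category : String) (rest : List String) :
    ∀ (pre : List (String × String)) (a0 : String),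
    (∀ x ∈ rest, pvIsQ x = false) →
    (∀ p ∈ pre, p.1 ≠ "ideal_answer" ∧ p.1 ≠ "category") →
    (rest.foldl (pvStepD category) (PySem.Dict.mk (pre ++ [("ideal_answer", a0), ("category", category)]))).items
      = pre ++ [("ideal_answer", (((rest.filter pvIsA).map pvPayload).getLast?).getD a0), ("category", category)] := by
  induction rest with
  | nil => intro pre a0 _ _; simp
  | cons x rest ih =>
    intro pre a0 hrest hp
    have hx : pvIsQ x = false := hrest x (by simp)
    have hrest' : ∀ y ∈ rest, pvIsQ y = false := fun y hy => hrest y (by simp [hy])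
    rw [List.foldl_cons]
    by_cases ha : pvIsA x = true
    · have hc1 : (PySem.Dict.mk (pre ++ [("ideal_answer", a0), ("category", category)])).contains
          "ideal_answer" = true := by
        rw [PySem.Dict.contains_iff_mem_keys]
        simp only [PySem.Dict.keys]
        simp
      have hi1 : ((PySem.Dict.mk (pre ++ [("ideal_answer", a0), ("category", category)])).insert
          "ideal_answer" (pvPayload x)).items
          = pre ++ [("ideal_answer", pvPayload x), ("category", category)] := by
        rw [PySem.Dict.items_insert_of_contains _ _ hc1]
        simp only [List.map_append]
        rw [pvMapId pre _ _ (fun p hq => (hp p hq).1)]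
        simp
      have hc0 : (PySem.Dict.mk (pre ++ [("ideal_answer", a0), ("category", category)])).contains
          "category" = true := by
        rw [PySem.Dict.contains_iff_mem_keys]
        simp only [PySem.Dict.keys]
        simp
      have hc2 : ((PySem.Dict.mk (pre ++ [("ideal_answer", a0), ("category", category)])).insert
          "ideal_answer" (pvPayload x)).contains "category" = true := by
        rw [PySem.Dict.contains_insert, hc0]
        simp
      have hD : pvStepD category
          (PySem.Dict.mk (pre ++ [("ideal_answer", a0), ("category", category)])) x
          = PySem.Dict.mk (pre ++ [("ideal_answer", pvPayload x), ("category", category)]) := by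
        apply PySem.Dict.ext
        simp only [pvStepD, hx, Bool.false_eq_true, if_false, ha, if_true]
        rw [PySem.Dict.items_insert_of_contains _ _ hc2, hi1]
        simp only [List.map_append]
        rw [pvMapId pre _ _ (fun p hq => (hp p hq).2)]
        simp
      rw [hD, ih pre (pvPayload x) hrest' hp, List.filter_cons_of_pos ha, List.map_cons,
        List.getLast?_cons]
      simp
    · have hD : pvStepD category
          (PySem.Dict.mk (pre ++ [("ideal_answer", a0), ("category", category)])) x
          = PySem.Dict.mk (pre ++ [("ideal_answer", a0), ("category", category)]) := by
        simp [pvStepD, hx, ha]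
      rw [hD, ih pre a0 hrest' hp, List.filter_cons_of_neg (by simp [ha])]

-- fresh phase: the dict does not contain the two answer keys yet
lemma pvL4 (category : String) (rest : List String) :
    ∀ (d : PySem.Dict String String),
    (∀ x ∈ rest, pvIsQ x = false) →
    d.contains "ideal_answer" = false → d.contains "category" = false →
    (rest.foldl (pvStepD category) d).items = d.items ++ pvTail category rest := by
  induction rest with
  | nil => intro d _ _ _; simp [pvTail]
  | cons x rest ih =>
    intro d hrest h1 h2
    have hx : pvIsQ x = false := hrest x (by simp)
    have hrest' : ∀ y ∈ rest, pvIsQ y = false := fun y hy => hrest y (by simp [hy])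
    rw [List.foldl_cons]
    by_cases ha : pvIsA x = true
    · have hi1 : (d.insert "ideal_answer" (pvPayload x)).items
          = d.items ++ [("ideal_answer", pvPayload x)] :=
        PySem.Dict.items_insert_of_not_contains d _ h1
      have hc2 : (d.insert "ideal_answer" (pvPayload x)).contains "category" = false := by
        rw [PySem.Dict.contains_insert]
        simp [h2]
      have hD : pvStepD category d x
          = PySem.Dict.mk (d.items ++ [("ideal_answer", pvPayload x), ("category", category)]) := by
        apply PySem.Dict.ext
        simp only [pvStepD, hx, Bool.false_eq_true, if_false, ha, if_true]
        rw [PySem.Dict.items_insert_of_not_contains _ _ hc2, hi1]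
        simp
      have hpre : ∀ p ∈ d.items, p.1 ≠ "ideal_answer" ∧ p.1 ≠ "category" :=
        fun p hq => ⟨pvNotKey d _ h1 p hq, pvNotKey d _ h2 p hq⟩
      rw [hD, pvL5 category rest d.items (pvPayload x) hrest' hpre,
        pvTail_cons_of_A category x rest ha]
    · have hD : pvStepD category d x = d := by simp [pvStepD, hx, ha]
      rw [hD, ih d hrest' h1 h2, pvTail_cons_of_not_A category x rest (by simpa using ha)]

-- per-group: A's incremental dict equals B's to_dict, for groups whose tail has no Q line
lemma pvGroupEq (category : String) (g : List String)
    (hg : ∀ x ∈ g.drop 1, pvIsQ x = false) :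
    (pvDictOf category g).items = pvToDict category g := by
  cases g with
  | nil => rfl
  | cons g0 rest =>
    have hrest : ∀ x ∈ rest, pvIsQ x = false := by simpa using hg
    by_cases hq0 : pvIsQ g0 = true
    · have hA0 : pvIsA g0 = false := pvQ_not_A g0 hq0
      have hstep0 : pvStepD category PySem.Dict.empty g0
          = PySem.Dict.empty.insert "question" (pvPayload g0) := by simp [pvStepD, hq0]
      have h1 : (PySem.Dict.empty.insert "question" (pvPayload g0)).items
          = [("question", pvPayload g0)] := by
        rw [PySem.Dict.items_insert_of_not_contains _ _ (PySem.Dict.contains_empty _)]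
        rfl
      have hc1 : (PySem.Dict.empty.insert "question" (pvPayload g0)).contains
          "ideal_answer" = false := by
        rw [PySem.Dict.contains_insert]
        simp [PySem.Dict.contains_empty]
      have hc2 : (PySem.Dict.empty.insert "question" (pvPayload g0)).contains
          "category" = false := by
        rw [PySem.Dict.contains_insert]
        simp [PySem.Dict.contains_empty]
      unfold pvDictOf
      rw [List.foldl_cons, hstep0, pvL4 category rest _ hrest hc1 hc2, h1]
      rw [pvToDict_eq_tail, pvTail_cons_of_not_A category g0 rest hA0]
      simp [hq0]
    · have hall : ∀ x ∈ g0 :: rest, pvIsQ x = false := by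
        intro y hy
        rcases List.mem_cons.mp hy with h | h
        · subst h; simpa using hq0
        · exact hrest y h
      unfold pvDictOf
      rw [pvL4 category (g0 :: rest) PySem.Dict.empty hall
        (PySem.Dict.contains_empty _) (PySem.Dict.contains_empty _)]
      rw [pvToDict_eq_tail]
      simp only [hq0, Bool.false_eq_true, if_false]
      simp [PySem.Dict.empty]

lemma pvOutAB (category : String) (l : List String) :
    ∀ g, (∀ x ∈ g.drop 1, pvIsQ x = false) → pvOutA category g l = pvOutB category g l := by
  induction l with
  | nil =>
    intro g hg
    simp only [pvOutA, pvOutB, pvGroupEq category g hg]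
  | cons x l ih =>
    intro g hg
    simp only [pvOutA, pvOutB]
    by_cases hq : pvIsQ x = true
    · simp only [hq, if_true]
      rw [pvGroupEq category g hg, ih [x] (by simp)]
    · simp only [hq, Bool.false_eq_true, if_false]
      apply ih
      intro y hy
      cases g with
      | nil => simp at hy
      | cons a g' =>
        simp only [List.cons_append, List.drop_succ_cons, List.drop_zero] at hy
        rcases List.mem_append.mp hy with h | h
        · exact hg y (by simpa using h)
        · simp only [List.mem_singleton] at h
          subst h
          simpa using hq

def pvFinA (st : List (PySem.Dict String String) × PySem.Dict String String) :
    List (List (String × String)) :=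
  (if st.2.items.isEmpty then st.1 else st.1 ++ [st.2]).map (fun d => d.items)

lemma pvLA (category : String) (l : List String) :
    ∀ (qs : List (PySem.Dict String String)) (g : List String),
    pvFinA (l.foldl (pvAStep category) (qs, pvDictOf category g))
      = qs.map (fun d => d.items) ++ pvOutA category g l := by
  induction l with
  | nil =>
    intro qs g
    simp only [List.foldl_nil, pvOutA, pvEmit, pvFinA]
    cases h : (pvDictOf category g).items.isEmpty <;>
      simp only [Bool.false_eq_true, if_true, if_false, List.map_append, List.map_cons,
        List.map_nil, List.append_nil]
  | cons x l ih =>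
    intro qs g
    rw [List.foldl_cons]
    by_cases hq : pvIsQ x = true
    · have hx : PySem.Str.startswith (PySem.Str.strip x) "Q:" = true := hq
      have hstep : pvAStep category (qs, pvDictOf category g) x
          = ((if (pvDictOf category g).items.isEmpty then qs else qs ++ [pvDictOf category g]),
             pvDictOf category [x]) := by
        have h1x : pvDictOf category [x] = PySem.Dict.empty.insert "question"
            (PySem.Str.strip (PySem.Str.slice (PySem.Str.strip x) (some 2))) := by
          simp [pvDictOf, pvStepD, hq, pvPayload]
        rw [h1x]
        by_cases hemp : (pvDictOf category g).items.isEmpty = true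
        · have hde : pvDictOf category g = PySem.Dict.empty := by
            apply PySem.Dict.ext
            simpa [List.isEmpty_iff] using hemp
          simp only [pvAStep, hx, if_true]
          rw [if_pos hemp, if_pos hemp, hde]
        · simp only [pvAStep, hx, if_true]
          rw [if_neg hemp, if_neg hemp]
      rw [hstep, ih]
      simp only [pvOutA, hq, if_true, pvEmit]
      cases h : (pvDictOf category g).items.isEmpty <;>
        simp only [Bool.false_eq_true, if_true, if_false, List.map_append, List.map_cons,
          List.map_nil, List.append_assoc, List.nil_append]
    · have hx : PySem.Str.startswith (PySem.Str.strip x) "Q:" = false := by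
        simpa [pvIsQ] using hq
      have hg' : pvDictOf category (g ++ [x]) = pvStepD category (pvDictOf category g) x := by
        simp [pvDictOf]
      have hstep : pvAStep category (qs, pvDictOf category g) x
          = (qs, pvDictOf category (g ++ [x])) := by
        by_cases ha : pvIsA x = true
        · have hax : PySem.Str.startswith (PySem.Str.strip x) "A:" = true := ha
          simp only [pvAStep, hx, Bool.false_eq_true, if_false, hax, if_true, hg',
            pvStepD, hq, ha, pvPayload]
        · have hax : PySem.Str.startswith (PySem.Str.strip x) "A:" = false := by
            simpa [pvIsA] using ha
          simp only [pvAStep, hx, hax, Bool.false_eq_true, if_false, hg',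
            pvStepD, hq, ha]
      rw [hstep, ih]
      simp only [pvOutA, hq, Bool.false_eq_true, if_false]

lemma pvLB (category : String) (l : List String) :
    ∀ (cl : List (List String)) (op : List String),
    (let st := l.foldl
        (fun (st : List (List String) × List String) line =>
          if pvIsQ line then (st.1 ++ [st.2], [line]) else (st.1, st.2 ++ [line])) (cl, op);
     ((st.1 ++ [st.2]).map (pvToDict category)).filter (fun d => !d.isEmpty))
      = (cl.map (pvToDict category)).filter (fun d => !d.isEmpty) ++ pvOutB category op l := by
  induction l with
  | nil =>
    intro cl op
    simp only [List.foldl_nil, pvOutB, pvEmit]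
    cases h : (pvToDict category op).isEmpty <;>
      simp [List.filter_append, List.map_append, h]
  | cons x l ih =>
    intro cl op
    simp only [List.foldl_cons]
    by_cases hq : pvIsQ x = true
    · simp only [hq, if_true]
      rw [ih (cl ++ [op]) [x]]
      simp only [pvOutB, hq, if_true, pvEmit]
      cases h : (pvToDict category op).isEmpty <;>
        simp [List.filter_append, List.map_append, h]
    · simp only [hq, if_false, Bool.false_eq_true]
      rw [ih cl (op ++ [x])]
      simp [pvOutB, hq]

-- ===== VERDICT (by name: the statement is the Claim_ definition above) =====
theorem parse_output_to_questions_spec : Claim_equal_parse_output_to_questions := by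
  intro raw_output category _
  unfold Spec_parse_output_to_questions
  unfold parse_output_to_questions parse_output_to_questions_alt
  have hA := pvLA category ((PySem.Str.split? (PySem.Str.strip raw_output) "\n").getD []) [] []
  have hB := pvLB category ((PySem.Str.split? (PySem.Str.strip raw_output) "\n").getD []) [] []
  rw [show pvDictOf category [] = PySem.Dict.empty from rfl] at hA
  simp only [pvFinA] at hA
  simp only at hB
  rw [hA, hB]
  simp [pvOutAB category _ [] (by simp)]
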